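-- pv_equiv track=rewrite | github.com/srisivan/Meal-Planning-Project | dynamic_programming.py | dp_meal_plan
-- ===== SOURCE A (Python) =====
-- def dp_meal_plan(breakfast_calories, food_calories, drink_calories, drink_item):
--     items = list(food_calories.keys()) + ["drink"]
--     calories = list(food_calories.values()) + [drink_calories]
--     n = len(items)
--
--     # DP table initialization
--     dp = [[0] * (int(breakfast_calories) + 1) for _ in range(n + 1)]
--     allocation = {}
--
--     # Populate DP table
--     for i in range(1, n + 1):
--         for w in range(int(breakfast_calories) + 1):
--             if calories[i - 1] <= w:
--                 dp[i][w] = max(dp[i - 1][w], dp[i - 1][w - int(calories[i - 1])] + calories[i - 1])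
--             else:
--                 dp[i][w] = dp[i - 1][w]
--
--     # Traceback to find allocation
--     w = int(breakfast_calories)
--     for i in range(n, 0, -1):
--         if dp[i][w] != dp[i - 1][w]:
--             item = items[i - 1]
--             if item not in allocation:
--                 allocation[item] = 0
--             allocation[item] += 1
--             w -= int(calories[i - 1])
--
--     return allocation, drink_item
-- ===== SOURCE B (Python) =====
-- def dp_meal_plan(breakfast_calories, food_calories, drink_calories, drink_item):
--     items = list(food_calories.keys()) + ["drink"]
--     calories = list(food_calories.values()) + [drink_calories]
--     memo = {}
--
--     def best(i, w):
--         # max calories achievable with the first i items within budget w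
--         if i == 0:
--             return 0
--         key = (i, w)
--         if key in memo:
--             return memo[key]
--         c = calories[i - 1]
--         v = best(i - 1, w)
--         if c <= w:
--             v = max(v, best(i - 1, w - int(c)) + c)
--         memo[key] = v
--         return v
--
--     allocation = {}
--     w = int(breakfast_calories)
--     for i in range(len(items), 0, -1):
--         c = calories[i - 1]
--         if c <= w and best(i - 1, w - int(c)) + c > best(i - 1, w):
--             item = items[i - 1]
--             allocation[item] = allocation.get(item, 0) + 1
--             w -= int(c)
--     return allocation, drink_item
-- ===== Notes on version B (the rewrite author's own statement) =====
-- stated objective: alternative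
-- what changed: Replaces the bottom-up (n+1)x(W+1) DP table fill followed by a table-reading traceback with top-down memoized recursion best(i,w) that the traceback queries directly, so only reachable (i,w) states are ever computed.
import Mathlib
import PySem

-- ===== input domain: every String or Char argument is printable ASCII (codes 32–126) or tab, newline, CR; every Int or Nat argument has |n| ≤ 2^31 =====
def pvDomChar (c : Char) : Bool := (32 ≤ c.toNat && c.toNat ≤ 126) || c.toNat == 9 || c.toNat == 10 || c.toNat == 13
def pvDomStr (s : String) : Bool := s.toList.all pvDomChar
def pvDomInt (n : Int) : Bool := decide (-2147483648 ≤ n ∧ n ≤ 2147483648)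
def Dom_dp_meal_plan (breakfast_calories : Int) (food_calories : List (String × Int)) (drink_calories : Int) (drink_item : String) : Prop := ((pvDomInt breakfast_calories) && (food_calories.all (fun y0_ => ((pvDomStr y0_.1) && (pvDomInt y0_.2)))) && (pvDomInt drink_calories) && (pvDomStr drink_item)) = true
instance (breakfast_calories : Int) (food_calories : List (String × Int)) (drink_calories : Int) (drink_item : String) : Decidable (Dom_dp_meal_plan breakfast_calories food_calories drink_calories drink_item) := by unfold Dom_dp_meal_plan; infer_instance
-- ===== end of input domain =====

-- B replaces A's bottom-up (n+1)×(W+1) table fill + traceback by top-down memoized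
-- recursion queried directly by the traceback loop (objective: alternative decomposition).

-- ===== PORT A =====
-- inner body of "for w in range(int(breakfast_calories)+1): dp[i][w] = ..." (row i from row i-1)
def fillRowA (prev : List Int) (c : Int) (W : Int) : List Int :=
  (PySem.List.pyRange 0 (W + 1) 1).map (fun w =>
    if c ≤ w then max (PySem.List.pyGetD prev w 0) (PySem.List.pyGetD prev (w - c) 0 + c)
    else PySem.List.pyGetD prev w 0)

-- the dp table: row 0 is the all-zero row, row i is filled from row i-1 and calories[i-1]
def dpRowsA (W : Int) (prev : List Int) : List Int → List (List Int)
  | [] => [prev]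
  | c :: rest => prev :: dpRowsA W (fillRowA prev c W) rest

-- traceback loop body: "if dp[i][w] != dp[i-1][w]: ..." (pyGetD exact: Pre_ keeps every index in range)
def tbStepA (dp : List (List Int)) (items : List String) (cals : List Int)
    (st : PySem.Dict String Int × Int) (i : Int) : PySem.Dict String Int × Int :=
  let alloc := st.1
  let w := st.2
  if PySem.List.pyGetD (PySem.List.pyGetD dp i []) w 0 ≠
     PySem.List.pyGetD (PySem.List.pyGetD dp (i - 1) []) w 0 then
    let item := PySem.List.pyGetD items (i - 1) ""
    let alloc := if alloc.contains item then alloc else alloc.insert item 0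
    let alloc := alloc.insert item (alloc.getD item 0 + 1)
    (alloc, w - PySem.List.pyGetD cals (i - 1) 0)
  else st

def dp_meal_plan (breakfast_calories : Int) (food_calories : List (String × Int)) (drink_calories : Int) (drink_item : String) : (List (String × Int)) × String :=
  let items := food_calories.map Prod.fst ++ ["drink"]
  let cals := food_calories.map Prod.snd ++ [drink_calories]
  let n : Int := (items.length : Int)
  let W := breakfast_calories
  let dp := dpRowsA W (List.replicate (W + 1).toNat 0) cals
  let st := (PySem.List.pyRange n 0 (-1)).foldl (tbStepA dp items cals) (PySem.Dict.empty, W)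
  (st.1.items, drink_item)

-- ===== PORT B =====
-- best(i, w): max calories from the first i items within budget w, memo threaded
-- (cals.getD i 0 is exact for calories[i-1]: every call has i < cals.length)
def bestB (cals : List Int) : Nat → Int → PySem.Dict (Nat × Int) Int → Int × PySem.Dict (Nat × Int) Int
  | 0, _, memo => (0, memo)
  | i + 1, w, memo =>
    match memo.get? (i + 1, w) with
    | some v => (v, memo)
    | none =>
      let c := cals.getD i 0
      let p1 := bestB cals i w memo
      let p2 :=
        if c ≤ w then
          let q := bestB cals i (w - c) p1.2
          (max p1.1 (q.1 + c), q.2)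
        else p1
      (p2.1, p2.2.insert (i + 1, w) p2.1)

-- traceback loop body of B: take item i-1 iff including it is strictly better
def tbStepB (items : List String) (cals : List Int)
    (st : PySem.Dict String Int × Int × PySem.Dict (Nat × Int) Int) (i : Int) :
    PySem.Dict String Int × Int × PySem.Dict (Nat × Int) Int :=
  let alloc := st.1
  let w := st.2.1
  let memo := st.2.2
  let k := (i - 1).toNat
  let c := cals.getD k 0
  if c ≤ w then
    let pin := bestB cals k (w - c) memo
    let pex := bestB cals k w pin.2
    if pin.1 + c > pex.1 then
      let item := items.getD k ""
      (alloc.insert item (alloc.getD item 0 + 1), w - c, pex.2)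
    else (alloc, w, pex.2)
  else st

def dp_meal_plan_alt (breakfast_calories : Int) (food_calories : List (String × Int)) (drink_calories : Int) (drink_item : String) : (List (String × Int)) × String :=
  let items := food_calories.map Prod.fst ++ ["drink"]
  let cals := food_calories.map Prod.snd ++ [drink_calories]
  let st := (PySem.List.pyRange (cals.length : Int) 0 (-1)).foldl (tbStepB items cals)
    (PySem.Dict.empty, breakfast_calories, PySem.Dict.empty)
  (st.1.items, drink_item)

-- ===== PRECONDITION & SPEC =====
-- Pre_ excludes exactly the inputs where A raises IndexError: a negative budget (the dp
-- rows are empty and the traceback indexes them) or any negative calorie value (the fill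
-- loop indexes dp[i-1][w - c] beyond the row end).
def Pre_dp_meal_plan (breakfast_calories : Int) (food_calories : List (String × Int)) (drink_calories : Int) (drink_item : String) : Prop :=
  0 ≤ breakfast_calories ∧ (∀ p ∈ food_calories, 0 ≤ p.2) ∧ 0 ≤ drink_calories
instance (breakfast_calories : Int) (food_calories : List (String × Int)) (drink_calories : Int) (drink_item : String) : Decidable (Pre_dp_meal_plan breakfast_calories food_calories drink_calories drink_item) := by unfold Pre_dp_meal_plan; infer_instance

def pvWitness_dp_meal_plan : Int × (List (String × Int)) × Int × String := (10, [("a", 3), ("b", 4)], 2, "juice")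

def Spec_dp_meal_plan (breakfast_calories : Int) (food_calories : List (String × Int)) (drink_calories : Int) (drink_item : String) (out : (List (String × Int)) × String) : Prop := out = dp_meal_plan_alt breakfast_calories food_calories drink_calories drink_item
instance (breakfast_calories : Int) (food_calories : List (String × Int)) (drink_calories : Int) (drink_item : String) (out : (List (String × Int)) × String) : Decidable (Spec_dp_meal_plan breakfast_calories food_calories drink_calories drink_item out) := by unfold Spec_dp_meal_plan; infer_instance

-- ===== CLAIM (what is proved, stated in full; the proofs are below) =====
def Claim_equal_dp_meal_plan : Prop := ∀ (breakfast_calories : Int) (food_calories : List (String × Int)) (drink_calories : Int) (drink_item : String), Dom_dp_meal_plan breakfast_calories food_calories drink_calories drink_item → Pre_dp_meal_plan breakfast_calories food_calories drink_calories drink_item → Spec_dp_meal_plan breakfast_calories food_calories drink_calories drink_item (dp_meal_plan breakfast_calories food_calories drink_calories drink_item)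

-- ===== LEMMAS AND PROOFS =====

-- the common mathematical value function: best value from the first i items within budget w
def bestSpec (cals : List Int) : Nat → Int → Int
  | 0, _ => 0
  | i + 1, w =>
    if cals.getD i 0 ≤ w then
      max (bestSpec cals i w) (bestSpec cals i (w - cals.getD i 0) + cals.getD i 0)
    else bestSpec cals i w

-- the memo dict only ever stores correct bestSpec values
def MemoOK (cals : List Int) (m : PySem.Dict (Nat × Int) Int) : Prop :=
  ∀ k v, m.get? k = some v → v = bestSpec cals k.1 k.2

lemma memoOK_empty (cals : List Int) : MemoOK cals PySem.Dict.empty := by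
  intro k v h
  simp [PySem.Dict.get?_empty] at h

lemma memoOK_insert (cals : List Int) (m : PySem.Dict (Nat × Int) Int)
    (h : MemoOK cals m) (k : Nat × Int) (v : Int) (hv : v = bestSpec cals k.1 k.2) :
    MemoOK cals (m.insert k v) := by
  intro k' v' h'
  rw [PySem.Dict.get?_insert] at h'
  split at h'
  · rename_i hk; cases h'; subst hk; exact hv
  · exact h _ _ h'

lemma bestB_spec (cals : List Int) (i : Nat) (w : Int) (memo : PySem.Dict (Nat × Int) Int)
    (h : MemoOK cals memo) :
    (bestB cals i w memo).1 = bestSpec cals i w ∧ MemoOK cals (bestB cals i w memo).2 := by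
  induction i generalizing w memo with
  | zero => exact ⟨rfl, h⟩
  | succ i ih =>
    rcases hm : memo.get? (i + 1, w) with _ | v
    · have h1 := ih w memo h
      by_cases hcw : cals.getD i 0 ≤ w
      · have h2 := ih (w - cals.getD i 0) (bestB cals i w memo).2 h1.2
        have e : bestB cals (i + 1) w memo =
            ((max (bestB cals i w memo).1
                ((bestB cals i (w - cals.getD i 0) (bestB cals i w memo).2).1 + cals.getD i 0)),
             ((bestB cals i (w - cals.getD i 0) (bestB cals i w memo).2).2).insert (i + 1, w)
               (max (bestB cals i w memo).1
                 ((bestB cals i (w - cals.getD i 0) (bestB cals i w memo).2).1 + cals.getD i 0))) := by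
          simp only [bestB, hm, if_pos hcw]
        have hval : max (bestB cals i w memo).1
            ((bestB cals i (w - cals.getD i 0) (bestB cals i w memo).2).1 + cals.getD i 0) =
            bestSpec cals (i + 1) w := by
          rw [h1.1, h2.1, bestSpec, if_pos hcw]
        rw [e]
        exact ⟨hval, memoOK_insert cals _ h2.2 _ _ (by rw [hval])⟩
      · have e : bestB cals (i + 1) w memo =
            ((bestB cals i w memo).1,
             (bestB cals i w memo).2.insert (i + 1, w) (bestB cals i w memo).1) := by
          simp only [bestB, hm, if_neg hcw]
        have hval : (bestB cals i w memo).1 = bestSpec cals (i + 1) w := by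
          rw [h1.1, bestSpec, if_neg hcw]
        rw [e]
        exact ⟨hval, memoOK_insert cals _ h1.2 _ _ (by rw [hval])⟩
    · have hv := h _ _ hm
      have e : bestB cals (i + 1) w memo = (v, memo) := by simp only [bestB, hm]
      rw [e]
      exact ⟨hv, h⟩

-- "row represents f on budgets 0..W"
def RepRow (W : Int) (f : Int → Int) (row : List Int) : Prop :=
  row.length = (W + 1).toNat ∧ ∀ w : Int, 0 ≤ w → w ≤ W → PySem.List.pyGetD row w 0 = f w

lemma fillRowA_rep (W c : Int) (f : Int → Int) (prev : List Int) (hc : 0 ≤ c)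
    (h : RepRow W f prev) :
    RepRow W (fun w => if c ≤ w then max (f w) (f (w - c) + c) else f w) (fillRowA prev c W) := by
  constructor
  · simp [fillRowA, PySem.List.length_pyRange_one]
  · intro w hw0 hwW
    rw [fillRowA, PySem.List.pyGetD_map_pyRange_of_nonneg _ _ _ _ hw0 (by omega : w < W + 1)]
    by_cases hcw : c ≤ w
    · simp only [if_pos hcw]
      rw [h.2 w hw0 hwW, h.2 (w - c) (by omega) (by omega)]
    · simp only [if_neg hcw]
      rw [h.2 w hw0 hwW]

lemma replicate_rep (W : Int) (cals : List Int) :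
    RepRow W (bestSpec cals 0) (List.replicate (W + 1).toNat 0) := by
  refine ⟨by simp, ?_⟩
  intro w hw0 hwW
  rw [PySem.List.pyGetD_eq_getElem (xs := List.replicate (W + 1).toNat 0) (i := w) (d := 0) (by exact hw0) (by simp; omega)]
  simp [bestSpec]

lemma dpRowsA_rep (W : Int) (cals : List Int) (hc : ∀ x ∈ cals, 0 ≤ x) :
    ∀ (cs prev : List Int) (k : Nat), cals.drop k = cs → RepRow W (bestSpec cals k) prev →
    ∀ j, j ≤ cs.length → RepRow W (bestSpec cals (k + j)) ((dpRowsA W prev cs).getD j []) := by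
  intro cs
  induction cs with
  | nil =>
    intro prev k hdrop hprev j hj
    have hj0 : j = 0 := Nat.le_zero.mp hj
    subst hj0
    simpa [dpRowsA] using hprev
  | cons c rest ih =>
    intro prev k hdrop hprev j hj
    cases j with
    | zero => simpa [dpRowsA] using hprev
    | succ j =>
      have hck : cals.getD k 0 = c := by
        have h0 : cals[k]? = some c := by
          have h1 : (cals.drop k)[0]? = some c := by rw [hdrop]; rfl
          rwa [List.getElem?_drop, Nat.add_zero] at h1
        simp [List.getD_eq_getElem?_getD, h0]
      have hcmem : c ∈ cals := by
        have : c ∈ cals.drop k := by rw [hdrop]; exact List.mem_cons_self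
        exact List.mem_of_mem_drop this
      have hrep := fillRowA_rep W c (bestSpec cals k) prev (hc c hcmem) hprev
      have hrep' : RepRow W (bestSpec cals (k + 1)) (fillRowA prev c W) := by
        have hfun : (fun w => if c ≤ w then max (bestSpec cals k w) (bestSpec cals k (w - c) + c)
            else bestSpec cals k w) = bestSpec cals (k + 1) := by
          funext w
          rw [bestSpec, hck]
        rwa [hfun] at hrep
      have hdrop' : cals.drop (k + 1) = rest := by
        rw [← List.tail_drop, hdrop]; rfl
      have := ih (fillRowA prev c W) (k + 1) hdrop' hrep' j (by simpa using hj)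
      have harith : k + 1 + j = k + (j + 1) := by omega
      rw [harith] at this
      simpa [dpRowsA] using this

-- A's "if not in: = 0; += 1" collapses to B's single insert
lemma alloc_step_eq (d : PySem.Dict String Int) (k : String) :
    (let d' := if d.contains k then d else d.insert k 0;
     d'.insert k (d'.getD k 0 + 1)) = d.insert k (d.getD k 0 + 1) := by
  by_cases hk : d.contains k
  · simp [hk]
  · simp only [hk, if_false, Bool.false_eq_true]
    rw [PySem.Dict.getD_insert_self, PySem.Dict.insert_insert_self,
      PySem.Dict.getD_of_not_contains d _ (by simpa using hk)]

lemma tb_step (W : Int) (items : List String) (cals : List Int) (dp : List (List Int))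
    (hc : ∀ x ∈ cals, 0 ≤ x)
    (hdp : ∀ j, j ≤ cals.length → RepRow W (bestSpec cals j) (dp.getD j []))
    (m : Nat) (hm : m + 1 ≤ cals.length)
    (alloc : PySem.Dict String Int) (w : Int) (memo : PySem.Dict (Nat × Int) Int)
    (hw0 : 0 ≤ w) (hwW : w ≤ W) (hmemo : MemoOK cals memo) :
    (tbStepA dp items cals (alloc, w) ((m + 1 : Nat) : Int)).1 =
      (tbStepB items cals (alloc, w, memo) ((m + 1 : Nat) : Int)).1 ∧
    (tbStepA dp items cals (alloc, w) ((m + 1 : Nat) : Int)).2 =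
      (tbStepB items cals (alloc, w, memo) ((m + 1 : Nat) : Int)).2.1 ∧
    MemoOK cals (tbStepB items cals (alloc, w, memo) ((m + 1 : Nat) : Int)).2.2 ∧
    0 ≤ (tbStepA dp items cals (alloc, w) ((m + 1 : Nat) : Int)).2 ∧
    (tbStepA dp items cals (alloc, w) ((m + 1 : Nat) : Int)).2 ≤ W := by
  have hmlt : m < cals.length := hm
  have hi1 : ((m + 1 : Nat) : Int) - 1 = (m : Int) := by push_cast; ring
  have hkm : (((m + 1 : Nat) : Int) - 1).toNat = m := by rw [hi1]; exact Int.toNat_natCast m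
  have hrow1 : PySem.List.pyGetD (PySem.List.pyGetD dp ((m + 1 : Nat) : Int) []) w 0 =
      bestSpec cals (m + 1) w := by
    rw [PySem.List.pyGetD_natCast]
    exact (hdp (m + 1) hm).2 w hw0 hwW
  have hrow0 : PySem.List.pyGetD (PySem.List.pyGetD dp (((m + 1 : Nat) : Int) - 1) []) w 0 =
      bestSpec cals m w := by
    rw [hi1, PySem.List.pyGetD_natCast]
    exact (hdp m (by omega)).2 w hw0 hwW
  have hcal : PySem.List.pyGetD cals (((m + 1 : Nat) : Int) - 1) 0 = cals.getD m 0 := by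
    rw [hi1, PySem.List.pyGetD_natCast]
  have hitem : PySem.List.pyGetD items (((m + 1 : Nat) : Int) - 1) "" = items.getD m "" := by
    rw [hi1, PySem.List.pyGetD_natCast]
  have hc0 : 0 ≤ cals.getD m 0 := by
    have : cals.getD m 0 ∈ cals := by
      rw [List.getD_eq_getElem _ _ hmlt]
      exact List.getElem_mem hmlt
    exact hc _ this
  have hpin := bestB_spec cals m (w - cals.getD m 0) memo hmemo
  have hpex := bestB_spec cals m w (bestB cals m (w - cals.getD m 0) memo).2 hpin.2
  have hbs : bestSpec cals (m + 1) w =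
      if cals.getD m 0 ≤ w then
        max (bestSpec cals m w) (bestSpec cals m (w - cals.getD m 0) + cals.getD m 0)
      else bestSpec cals m w := by rw [bestSpec]
  simp only [tbStepA, tbStepB, hrow1, hrow0, hcal, hitem, hkm]
  by_cases hcw : cals.getD m 0 ≤ w
  · simp only [if_pos hcw, hpin.1, hpex.1]
    by_cases hgt : bestSpec cals m (w - cals.getD m 0) + cals.getD m 0 > bestSpec cals m w
    · have hne : bestSpec cals (m + 1) w ≠ bestSpec cals m w := by
        rw [hbs, if_pos hcw]; omega
      simp only [if_pos hne, if_pos hgt]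
      refine ⟨?_, ?_, ?_, ?_, ?_⟩ <;>
        first
          | trivial
          | exact hpex.2
          | (simpa using alloc_step_eq alloc (items.getD m ""))
          | omega
    · have hne : ¬ bestSpec cals (m + 1) w ≠ bestSpec cals m w := by
        rw [hbs, if_pos hcw]; omega
      simp only [if_neg hne, if_neg hgt]
      exact ⟨trivial, trivial, hpex.2, hw0, hwW⟩
  · have hne : ¬ bestSpec cals (m + 1) w ≠ bestSpec cals m w := by
      rw [hbs, if_neg hcw]; omega
    simp only [if_neg hne, if_neg hcw]
    exact ⟨trivial, trivial, hmemo, hw0, hwW⟩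

lemma tb_loop (W : Int) (items : List String) (cals : List Int) (dp : List (List Int))
    (hc : ∀ x ∈ cals, 0 ≤ x)
    (hdp : ∀ j, j ≤ cals.length → RepRow W (bestSpec cals j) (dp.getD j [])) :
    ∀ (m : Nat) (alloc : PySem.Dict String Int) (w : Int) (memo : PySem.Dict (Nat × Int) Int),
      m ≤ cals.length → 0 ≤ w → w ≤ W → MemoOK cals memo →
      ((PySem.List.pyRange (m : Int) 0 (-1)).foldl (tbStepA dp items cals) (alloc, w)).1 =
        ((PySem.List.pyRange (m : Int) 0 (-1)).foldl (tbStepB items cals) (alloc, w, memo)).1 := by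
  intro m
  induction m with
  | zero =>
    intro alloc w memo _ _ _ _
    rw [show ((0 : Nat) : Int) = 0 by norm_num, PySem.List.pyRange_neg_one_eq_nil le_rfl]
    simp
  | succ m ihm =>
    intro alloc w memo hm hw0 hwW hmemo
    rw [PySem.List.pyRange_neg_one_cons (by push_cast; omega : (0 : Int) < ((m + 1 : Nat) : Int)),
      show ((m + 1 : Nat) : Int) - 1 = (m : Int) by push_cast; ring]
    simp only [List.foldl_cons]
    obtain ⟨h1, h2, h3, h4, h5⟩ := tb_step W items cals dp hc hdp m hm alloc w memo hw0 hwW hmemo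
    have hA : tbStepA dp items cals (alloc, w) ((m + 1 : Nat) : Int) =
        ((tbStepB items cals (alloc, w, memo) ((m + 1 : Nat) : Int)).1,
         (tbStepB items cals (alloc, w, memo) ((m + 1 : Nat) : Int)).2.1) := by
      exact Prod.ext h1 h2
    rw [hA]
    have hB : tbStepB items cals (alloc, w, memo) ((m + 1 : Nat) : Int) =
        ((tbStepB items cals (alloc, w, memo) ((m + 1 : Nat) : Int)).1,
         (tbStepB items cals (alloc, w, memo) ((m + 1 : Nat) : Int)).2.1,
         (tbStepB items cals (alloc, w, memo) ((m + 1 : Nat) : Int)).2.2) := rfl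
    rw [hB]
    exact ihm _ _ _ (by omega) (h2 ▸ h4) (h2 ▸ h5) h3

-- ===== VERDICT (by name: the statement is the Claim_ definition above) =====
theorem dp_meal_plan_spec : Claim_equal_dp_meal_plan := by
  intro bc fc dc di _ hpre
  obtain ⟨hbc, hfc, hdc⟩ := hpre
  simp only [Spec_dp_meal_plan, dp_meal_plan, dp_meal_plan_alt]
  have hc : ∀ x ∈ (fc.map Prod.snd ++ [dc]), 0 ≤ x := by
    intro x hx
    rcases List.mem_append.mp hx with h | h
    · obtain ⟨p, hp, rfl⟩ := List.mem_map.mp h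
      exact hfc p hp
    · rw [List.mem_singleton.mp h]
      exact hdc
  have hdp : ∀ j, j ≤ (fc.map Prod.snd ++ [dc]).length →
      RepRow bc (bestSpec (fc.map Prod.snd ++ [dc]) j)
        ((dpRowsA bc (List.replicate (bc + 1).toNat 0) (fc.map Prod.snd ++ [dc])).getD j []) := by
    intro j hj
    have := dpRowsA_rep bc (fc.map Prod.snd ++ [dc]) hc (fc.map Prod.snd ++ [dc])
      (List.replicate (bc + 1).toNat 0) 0 rfl (replicate_rep bc (fc.map Prod.snd ++ [dc])) j hj
    simpa using this
  have hlen : ((fc.map Prod.fst ++ ["drink"]).length : Int) =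
      (((fc.map Prod.snd ++ [dc]) : List Int).length : Int) := by simp
  rw [hlen]
  have hmain := tb_loop bc (fc.map Prod.fst ++ ["drink"]) (fc.map Prod.snd ++ [dc]) _ hc hdp
    (fc.map Prod.snd ++ [dc]).length PySem.Dict.empty bc PySem.Dict.empty le_rfl hbc le_rfl
    (memoOK_empty _)
  rw [hmain]
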